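-- pv_equiv track=rewrite | github.com/mahmudhera/fmm | test_unitigs/process_unitigs.py | find_bridging_unitigs
-- ===== SOURCE A (Python) =====
-- def find_bridging_unitigs(unitigs_in_orig, unitigs_in_mutated, graph, children, parent):
--     bridging_unitig_pairs = []
--     for unitig_orig in unitigs_in_orig:
--         for unitig_mutated in unitigs_in_mutated:
--             try:
--                 unitig_orig_parents = parent[unitig_orig]
--                 unitig_mutated_parents = parent[unitig_mutated]
--                 unitig_orig_children = children[unitig_orig]
--                 unitig_mutated_children = children[unitig_mutated]
--
--                 if len(set(unitig_orig_parents).intersection(set(unitig_mutated_parents))) > 0 and len(set(unitig_mutated_children).intersection(set(unitig_orig_children))) > 0: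
--                     bridging_unitig_pairs.append((unitig_orig, unitig_mutated))
--             except KeyError:
--                 continue
--     return bridging_unitig_pairs
-- ===== SOURCE B (Python) =====
-- def find_bridging_unitigs(unitigs_in_orig, unitigs_in_mutated, graph, children, parent):
--     # Inverted index: parent value -> mutated unitigs having it, child value -> mutated unitigs having it.
--     par_idx = {}
--     chi_idx = {}
--     for m in unitigs_in_mutated:
--         if m in parent and m in children:
--             for p in parent[m]:
--                 par_idx.setdefault(p, set()).add(m)
--             for c in children[m]:
--                 chi_idx.setdefault(c, set()).add(m)
--     out = []
--     for o in unitigs_in_orig: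
--         if o in parent and o in children:
--             P = set()
--             for p in parent[o]:
--                 P |= par_idx.get(p, set())
--             C = set()
--             for c in children[o]:
--                 C |= chi_idx.get(c, set())
--             qual = P & C
--             out.extend((o, m) for m in unitigs_in_mutated if m in qual)
--     return out
-- ===== Notes on version B (the rewrite author's own statement) =====
-- stated objective: faster
-- what changed: Replaces A's all-pairs nested loop, which builds and intersects the parent/child sets of every (orig, mutated) pair, by inverted indexes built in one pass over the mutated unitigs (parent value -> set of mutated unitigs, child value -> set of mutated unitigs); per orig unitig the qualifying mutated set is one union-and-intersect, and the mutated list is scanned once with O(1) membership tests to keep A's output order.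
import Mathlib
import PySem

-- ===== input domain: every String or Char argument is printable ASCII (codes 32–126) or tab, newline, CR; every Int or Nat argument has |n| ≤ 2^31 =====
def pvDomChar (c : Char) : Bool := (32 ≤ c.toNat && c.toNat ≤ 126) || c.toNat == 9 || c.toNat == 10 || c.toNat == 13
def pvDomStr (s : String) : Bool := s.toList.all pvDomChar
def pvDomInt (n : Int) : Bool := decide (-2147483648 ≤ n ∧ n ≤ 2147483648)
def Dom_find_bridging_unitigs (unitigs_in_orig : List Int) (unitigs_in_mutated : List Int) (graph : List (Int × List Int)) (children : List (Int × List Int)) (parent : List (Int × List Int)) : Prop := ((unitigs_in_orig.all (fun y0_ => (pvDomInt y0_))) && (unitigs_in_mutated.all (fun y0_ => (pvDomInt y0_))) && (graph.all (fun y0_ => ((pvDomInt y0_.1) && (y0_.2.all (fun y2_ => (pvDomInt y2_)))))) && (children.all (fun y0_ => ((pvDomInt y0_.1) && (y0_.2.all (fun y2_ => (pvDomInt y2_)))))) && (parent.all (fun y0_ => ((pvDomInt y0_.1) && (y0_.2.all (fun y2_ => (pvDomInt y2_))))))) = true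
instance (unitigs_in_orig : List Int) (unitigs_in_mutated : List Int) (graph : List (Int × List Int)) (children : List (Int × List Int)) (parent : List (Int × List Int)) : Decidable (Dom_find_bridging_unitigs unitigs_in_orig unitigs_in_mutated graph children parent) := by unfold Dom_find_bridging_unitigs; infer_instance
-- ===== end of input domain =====

-- B replaces A's all-pairs nested loop (with per-pair set building) by an inverted index from
-- parent/child values to mutated unitigs; equivalence of the return values is proved on the whole domain.

-- ===== PORT A =====
-- literal port of A: nested loops over orig × mutated; sequential dict lookups (KeyError → skip pair);
-- append the pair when both set intersections are nonempty
def find_bridging_unitigs (unitigs_in_orig : List Int) (unitigs_in_mutated : List Int) (graph : List (Int × List Int)) (children : List (Int × List Int)) (parent : List (Int × List Int)) : List (Int × Int) :=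
  let parentD : PySem.Dict Int (List Int) := PySem.Dict.mk parent
  let childD : PySem.Dict Int (List Int) := PySem.Dict.mk children
  unitigs_in_orig.foldl (fun acc unitig_orig =>
    unitigs_in_mutated.foldl (fun acc unitig_mutated =>
      match parentD.get? unitig_orig with
      | none => acc
      | some unitig_orig_parents =>
        match parentD.get? unitig_mutated with
        | none => acc
        | some unitig_mutated_parents =>
          match childD.get? unitig_orig with
          | none => acc
          | some unitig_orig_children =>
            match childD.get? unitig_mutated with
            | none => acc
            | some unitig_mutated_children =>
              if 0 < PySem.Set.len (PySem.Set.inter (PySem.Set.ofList unitig_orig_parents) (PySem.Set.ofList unitig_mutated_parents)) ∧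
                 0 < PySem.Set.len (PySem.Set.inter (PySem.Set.ofList unitig_mutated_children) (PySem.Set.ofList unitig_orig_children))
              then acc ++ [(unitig_orig, unitig_mutated)]
              else acc) acc) []

-- ===== PORT B =====
-- one pass over mutated builds the parent index (parent value ↦ set of mutated unitigs)
def fbuParIdx (pd cd : PySem.Dict Int (List Int)) (d : PySem.Dict Int (PySem.Set Int)) (m : Int) : PySem.Dict Int (PySem.Set Int) :=
  match pd.get? m, cd.get? m with
  | some mp, some _ => mp.foldl (fun d p => d.insert p (PySem.Set.add (d.getD p PySem.Set.empty) m)) d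
  | _, _ => d

-- … and the child index (child value ↦ set of mutated unitigs)
def fbuChiIdx (pd cd : PySem.Dict Int (List Int)) (d : PySem.Dict Int (PySem.Set Int)) (m : Int) : PySem.Dict Int (PySem.Set Int) :=
  match pd.get? m, cd.get? m with
  | some _, some mc => mc.foldl (fun d c => d.insert c (PySem.Set.add (d.getD c PySem.Set.empty) m)) d
  | _, _ => d

def find_bridging_unitigs_alt (unitigs_in_orig : List Int) (unitigs_in_mutated : List Int) (graph : List (Int × List Int)) (children : List (Int × List Int)) (parent : List (Int × List Int)) : List (Int × Int) :=
  let parentD : PySem.Dict Int (List Int) := PySem.Dict.mk parent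
  let childD : PySem.Dict Int (List Int) := PySem.Dict.mk children
  let idxs := unitigs_in_mutated.foldl
      (fun s m => (fbuParIdx parentD childD s.1 m, fbuChiIdx parentD childD s.2 m))
      (PySem.Dict.empty, PySem.Dict.empty)
  unitigs_in_orig.foldl (fun out o =>
    match parentD.get? o, childD.get? o with
    | some op, some oc =>
      let P := op.foldl (fun s p => PySem.Set.union s (idxs.1.getD p PySem.Set.empty)) PySem.Set.empty
      let C := oc.foldl (fun s c => PySem.Set.union s (idxs.2.getD c PySem.Set.empty)) PySem.Set.empty
      let qual := PySem.Set.inter P C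
      out ++ (unitigs_in_mutated.filter (fun m => PySem.Set.contains qual m)).map (fun m => (o, m))
    | _, _ => out) []

-- ===== PRECONDITION & SPEC =====
def Spec_find_bridging_unitigs (unitigs_in_orig : List Int) (unitigs_in_mutated : List Int) (graph : List (Int × List Int)) (children : List (Int × List Int)) (parent : List (Int × List Int)) (out : List (Int × Int)) : Prop := out = find_bridging_unitigs_alt unitigs_in_orig unitigs_in_mutated graph children parent
instance (unitigs_in_orig : List Int) (unitigs_in_mutated : List Int) (graph : List (Int × List Int)) (children : List (Int × List Int)) (parent : List (Int × List Int)) (out : List (Int × Int)) : Decidable (Spec_find_bridging_unitigs unitigs_in_orig unitigs_in_mutated graph children parent out) := by unfold Spec_find_bridging_unitigs; infer_instance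

-- ===== CLAIM (what is proved, stated in full; the proofs are below) =====
def Claim_equal_find_bridging_unitigs : Prop := ∀ (unitigs_in_orig : List Int) (unitigs_in_mutated : List Int) (graph : List (Int × List Int)) (children : List (Int × List Int)) (parent : List (Int × List Int)), Dom_find_bridging_unitigs unitigs_in_orig unitigs_in_mutated graph children parent → Spec_find_bridging_unitigs unitigs_in_orig unitigs_in_mutated graph children parent (find_bridging_unitigs unitigs_in_orig unitigs_in_mutated graph children parent)

-- ===== LEMMAS AND PROOFS =====

-- the per-pair acceptance test of A, as a boolean predicate (sequential lookups, then both intersections nonempty)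
def fbuCond (pd cd : PySem.Dict Int (List Int)) (o m : Int) : Bool :=
  match pd.get? o with
  | none => false
  | some op =>
    match pd.get? m with
    | none => false
    | some mp =>
      match cd.get? o with
      | none => false
      | some oc =>
        match cd.get? m with
        | none => false
        | some mc =>
          decide (0 < PySem.Set.len (PySem.Set.inter (PySem.Set.ofList op) (PySem.Set.ofList mp)) ∧
                  0 < PySem.Set.len (PySem.Set.inter (PySem.Set.ofList mc) (PySem.Set.ofList oc)))

-- membership after the inner insert loop of the index builders
theorem fbu_mem_insfold (ps : List Int) (d : PySem.Dict Int (PySem.Set Int)) (m p x : Int) :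
    x ∈ (ps.foldl (fun d p => d.insert p (PySem.Set.add (d.getD p PySem.Set.empty) m)) d).getD p PySem.Set.empty ↔
      x ∈ d.getD p PySem.Set.empty ∨ (p ∈ ps ∧ x = m) := by
  induction ps generalizing d with
  | nil => simp
  | cons q ps ih =>
    simp only [List.foldl_cons]
    rw [ih, PySem.Dict.getD_insert]
    by_cases h : p = q <;> simp [h, PySem.Set.mem_add] <;> tauto

-- membership in the parent index built by the single pass over the mutated unitigs
theorem fbu_mem_parIdx (um : List Int) (pd cd : PySem.Dict Int (List Int)) (d : PySem.Dict Int (PySem.Set Int)) (p x : Int) :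
    x ∈ (um.foldl (fbuParIdx pd cd) d).getD p PySem.Set.empty ↔
      x ∈ d.getD p PySem.Set.empty ∨ (x ∈ um ∧ (cd.get? x).isSome ∧ ∃ mp, pd.get? x = some mp ∧ p ∈ mp) := by
  induction um generalizing d with
  | nil => simp
  | cons m um ih =>
    simp only [List.foldl_cons]
    rw [ih]
    have hstep : ∀ y, y ∈ (fbuParIdx pd cd d m).getD p PySem.Set.empty ↔
        y ∈ d.getD p PySem.Set.empty ∨ (y = m ∧ (cd.get? m).isSome ∧ ∃ mp, pd.get? m = some mp ∧ p ∈ mp) := by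
      intro y
      rcases h1 : pd.get? m with _ | mp
      · simp [fbuParIdx, h1]
      · rcases h2 : cd.get? m with _ | mc
        · simp [fbuParIdx, h1, h2]
        · rw [show fbuParIdx pd cd d m
              = mp.foldl (fun d p => d.insert p (PySem.Set.add (d.getD p PySem.Set.empty) m)) d from by
                simp [fbuParIdx, h1, h2]]
          rw [fbu_mem_insfold]
          simp [h1, h2] <;> tauto
    rw [hstep]
    simp only [List.mem_cons]
    constructor
    · rintro ((h | ⟨rfl, h⟩) | ⟨hu, h⟩)
      · exact Or.inl h
      · exact Or.inr ⟨Or.inl rfl, h⟩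
      · exact Or.inr ⟨Or.inr hu, h⟩
    · rintro (h | ⟨rfl | hu, h⟩)
      · exact Or.inl (Or.inl h)
      · exact Or.inl (Or.inr ⟨rfl, h⟩)
      · exact Or.inr ⟨hu, h⟩

-- membership in the child index
theorem fbu_mem_chiIdx (um : List Int) (pd cd : PySem.Dict Int (List Int)) (d : PySem.Dict Int (PySem.Set Int)) (c x : Int) :
    x ∈ (um.foldl (fbuChiIdx pd cd) d).getD c PySem.Set.empty ↔
      x ∈ d.getD c PySem.Set.empty ∨ (x ∈ um ∧ (pd.get? x).isSome ∧ ∃ mc, cd.get? x = some mc ∧ c ∈ mc) := by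
  induction um generalizing d with
  | nil => simp
  | cons m um ih =>
    simp only [List.foldl_cons]
    rw [ih]
    have hstep : ∀ y, y ∈ (fbuChiIdx pd cd d m).getD c PySem.Set.empty ↔
        y ∈ d.getD c PySem.Set.empty ∨ (y = m ∧ (pd.get? m).isSome ∧ ∃ mc, cd.get? m = some mc ∧ c ∈ mc) := by
      intro y
      rcases h1 : pd.get? m with _ | mp
      · simp [fbuChiIdx, h1]
      · rcases h2 : cd.get? m with _ | mc
        · simp [fbuChiIdx, h1, h2]
        · rw [show fbuChiIdx pd cd d m
              = mc.foldl (fun d c => d.insert c (PySem.Set.add (d.getD c PySem.Set.empty) m)) d from by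
                simp [fbuChiIdx, h1, h2]]
          rw [fbu_mem_insfold]
          simp [h1, h2] <;> tauto
    rw [hstep]
    simp only [List.mem_cons]
    constructor
    · rintro ((h | ⟨rfl, h⟩) | ⟨hu, h⟩)
      · exact Or.inl h
      · exact Or.inr ⟨Or.inl rfl, h⟩
      · exact Or.inr ⟨Or.inr hu, h⟩
    · rintro (h | ⟨rfl | hu, h⟩)
      · exact Or.inl (Or.inl h)
      · exact Or.inl (Or.inr ⟨rfl, h⟩)
      · exact Or.inr ⟨hu, h⟩

-- membership after the union loop
theorem fbu_mem_unionfold (l : List Int) (idx : PySem.Dict Int (PySem.Set Int)) (s0 : PySem.Set Int) (x : Int) :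
    x ∈ l.foldl (fun s p => PySem.Set.union s (idx.getD p PySem.Set.empty)) s0 ↔
      x ∈ s0 ∨ ∃ p ∈ l, x ∈ idx.getD p PySem.Set.empty := by
  induction l generalizing s0 with
  | nil => simp
  | cons q l ih =>
    simp only [List.foldl_cons]
    rw [ih]
    simp only [PySem.Set.mem_union, List.mem_cons]
    constructor
    · rintro ((h | h) | ⟨p, hp, h⟩)
      · exact Or.inl h
      · exact Or.inr ⟨q, Or.inl rfl, h⟩
      · exact Or.inr ⟨p, Or.inr hp, h⟩
    · rintro (h | ⟨p, (rfl | hp), h⟩)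
      · exact Or.inl (Or.inl h)
      · exact Or.inl (Or.inr h)
      · exact Or.inr ⟨p, hp, h⟩

-- A's nonempty-intersection test is an existence statement
theorem fbu_inter_pos (a b : List Int) :
    (0 < List.length (PySem.Set.inter (PySem.Set.ofList a) (PySem.Set.ofList b))) ↔ ∃ x, x ∈ a ∧ x ∈ b := by
  simp [List.length_pos_iff_exists_mem, PySem.Set.mem_inter, PySem.Set.mem_ofList]

-- A's inner loop is a filter
theorem fbu_foldl_filter (l : List Int) (o : Int) (cond : Int → Bool) (acc : List (Int × Int)) :
    l.foldl (fun acc m => if cond m then acc ++ [(o, m)] else acc) acc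
      = acc ++ (l.filter cond).map (fun m => (o, m)) := by
  induction l generalizing acc with
  | nil => simp
  | cons m l ih =>
    simp only [List.foldl_cons, List.filter_cons]
    by_cases h : cond m
    · simp [h, ih]
    · simp [h, ih]

-- A's inner loop, rewritten through fbuCond
theorem fbu_A_inner (um : List Int) (pd cd : PySem.Dict Int (List Int)) (o : Int) (acc : List (Int × Int)) :
    um.foldl (fun acc m =>
      match pd.get? o with
      | none => acc
      | some unitig_orig_parents =>
        match pd.get? m with
        | none => acc
        | some unitig_mutated_parents =>
          match cd.get? o with
          | none => acc
          | some unitig_orig_children =>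
            match cd.get? m with
            | none => acc
            | some unitig_mutated_children =>
              if 0 < PySem.Set.len (PySem.Set.inter (PySem.Set.ofList unitig_orig_parents) (PySem.Set.ofList unitig_mutated_parents)) ∧
                 0 < PySem.Set.len (PySem.Set.inter (PySem.Set.ofList unitig_mutated_children) (PySem.Set.ofList unitig_orig_children))
              then acc ++ [(o, m)]
              else acc) acc
      = acc ++ (um.filter (fbuCond pd cd o)).map (fun m => (o, m)) := by
  have hfun : (fun (acc : List (Int × Int)) (m : Int) =>
      match pd.get? o with
      | none => acc
      | some unitig_orig_parents =>
        match pd.get? m with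
        | none => acc
        | some unitig_mutated_parents =>
          match cd.get? o with
          | none => acc
          | some unitig_orig_children =>
            match cd.get? m with
            | none => acc
            | some unitig_mutated_children =>
              if 0 < PySem.Set.len (PySem.Set.inter (PySem.Set.ofList unitig_orig_parents) (PySem.Set.ofList unitig_mutated_parents)) ∧
                 0 < PySem.Set.len (PySem.Set.inter (PySem.Set.ofList unitig_mutated_children) (PySem.Set.ofList unitig_orig_children))
              then acc ++ [(o, m)]
              else acc)
      = fun acc m => if fbuCond pd cd o m then acc ++ [(o, m)] else acc := by
    funext acc m
    rcases hp : pd.get? o with _ | op <;> rcases hm : pd.get? m with _ | mp <;>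
      rcases hc : cd.get? o with _ | oc <;> rcases hcm : cd.get? m with _ | mc <;>
      simp [fbuCond, hp, hm, hc, hcm]
  rw [hfun, fbu_foldl_filter]

-- the outer loops agree, for any accumulator
theorem fbu_main (um : List Int) (pd cd : PySem.Dict Int (List Int)) (uo : List Int) (acc : List (Int × Int)) :
    uo.foldl (fun acc o =>
      um.foldl (fun acc m =>
        match pd.get? o with
        | none => acc
        | some unitig_orig_parents =>
          match pd.get? m with
          | none => acc
          | some unitig_mutated_parents =>
            match cd.get? o with
            | none => acc
            | some unitig_orig_children =>
              match cd.get? m with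
              | none => acc
              | some unitig_mutated_children =>
                if 0 < PySem.Set.len (PySem.Set.inter (PySem.Set.ofList unitig_orig_parents) (PySem.Set.ofList unitig_mutated_parents)) ∧
                   0 < PySem.Set.len (PySem.Set.inter (PySem.Set.ofList unitig_mutated_children) (PySem.Set.ofList unitig_orig_children))
                then acc ++ [(o, m)]
                else acc) acc) acc
    = uo.foldl (fun out o =>
        match pd.get? o, cd.get? o with
        | some op, some oc =>
          out ++ (um.filter (fun m => PySem.Set.contains
              (PySem.Set.inter
                (op.foldl (fun s p => PySem.Set.union s ((um.foldl (fbuParIdx pd cd) PySem.Dict.empty).getD p PySem.Set.empty)) PySem.Set.empty)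
                (oc.foldl (fun s c => PySem.Set.union s ((um.foldl (fbuChiIdx pd cd) PySem.Dict.empty).getD c PySem.Set.empty)) PySem.Set.empty))
              m)).map (fun m => (o, m))
        | _, _ => out) acc := by
  induction uo generalizing acc with
  | nil => rfl
  | cons o uo ih =>
    simp only [List.foldl_cons]
    rw [ih]
    congr 1
    rw [fbu_A_inner]
    rcases hp : pd.get? o with _ | op
    · have hnil : um.filter (fbuCond pd cd o) = [] :=
        List.filter_eq_nil_iff.mpr (by intro m _; simp [fbuCond, hp])
      simp [hnil, hp]
    · rcases hc : cd.get? o with _ | oc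
      · have hnil : um.filter (fbuCond pd cd o) = [] :=
          List.filter_eq_nil_iff.mpr (by
            intro m _
            rcases hm : pd.get? m with _ | mp <;> simp [fbuCond, hp, hc, hm])
        simp [hnil, hp, hc]
      · simp only [hp, hc]
        congr 2
        apply List.filter_congr
        intro m hmem
        rw [Bool.eq_iff_iff, PySem.Set.contains_iff, PySem.Set.mem_inter,
            fbu_mem_unionfold, fbu_mem_unionfold]
        simp only [fbu_mem_parIdx, fbu_mem_chiIdx, PySem.Dict.getD_empty]
        rcases hm : pd.get? m with _ | mp <;>
          rcases hcm : cd.get? m with _ | mc <;>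
          simp [fbuCond, hp, hc, hm, hcm, fbu_inter_pos, hmem, PySem.Set.empty] <;> aesop

-- ===== VERDICT (by name: the statement is the Claim_ definition above) =====
theorem find_bridging_unitigs_spec : Claim_equal_find_bridging_unitigs := by
  intro uo um graph ch pa _
  unfold Spec_find_bridging_unitigs
  simp only [find_bridging_unitigs, find_bridging_unitigs_alt]
  rw [PySem.List.foldl_prod_mk (f := fbuParIdx (PySem.Dict.mk pa) (PySem.Dict.mk ch))
        (g := fbuChiIdx (PySem.Dict.mk pa) (PySem.Dict.mk ch))]
  exact fbu_main um (PySem.Dict.mk pa) (PySem.Dict.mk ch) uo []
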